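-- pv_equiv track=rewrite | github.com/GirishJoshi/interviewcake | Arrays/first_come_first_served.py | is_first_come_first_served
-- ===== SOURCE A (Python) =====
-- def is_first_come_first_served(takeout, dinein, served):
--
--     takeout_index, dinein_index, served_index = 0, 0, 0
--     len_takeout, len_dinein = len(takeout), len(dinein)
--
--     for order in served:
--
--         # If we still have orders in takeout
--         # and the current order in takeout is the same as the current order in served
--         if takeout_index < len_takeout and takeout[takeout_index] == order:
--             takeout_index += 1
--             continue
--
--         # If we still have orders in dinein
--         # and the current order in dinein is the same as the current order in served
--         if dinein_index < len_dinein and dinein[dinein_index] == order: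
--             dinein_index += 1
--             continue
--         else:
--             return False
--
--     # Check for any extra orders at the end of take_out_orders or dine_in_orders
--     if takeout_index != len_takeout or dinein_index != len_dinein:
--         return False
--
--     # All orders in served_orders have been "accounted for"
--     # so we're serving first-come, first-served!
--     return True
-- ===== SOURCE B (Python) =====
-- def is_first_come_first_served(takeout, dinein, served):
--     # A valid merge must use every order exactly once, so the lengths must add up;
--     # checking that first lets the scan skip any leftover bookkeeping at the end.
--     if len(takeout) + len(dinein) != len(served):
--         return False
--     rt = takeout[::-1]
--     rd = dinein[::-1]
--     for order in served:
--         if rt and rt[-1] == order: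
--             rt.pop()
--         elif rd and rd[-1] == order:
--             rd.pop()
--         else:
--             return False
--     return True
-- ===== Notes on version B (the rewrite author's own statement) =====
-- stated objective: alternative
-- what changed: Instead of index pointers plus a leftover-index check at the end, B pre-checks that the lengths add up and then consumes reversed copies of the two queues as stacks via pop(), so the epilogue disappears.
import Mathlib
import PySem

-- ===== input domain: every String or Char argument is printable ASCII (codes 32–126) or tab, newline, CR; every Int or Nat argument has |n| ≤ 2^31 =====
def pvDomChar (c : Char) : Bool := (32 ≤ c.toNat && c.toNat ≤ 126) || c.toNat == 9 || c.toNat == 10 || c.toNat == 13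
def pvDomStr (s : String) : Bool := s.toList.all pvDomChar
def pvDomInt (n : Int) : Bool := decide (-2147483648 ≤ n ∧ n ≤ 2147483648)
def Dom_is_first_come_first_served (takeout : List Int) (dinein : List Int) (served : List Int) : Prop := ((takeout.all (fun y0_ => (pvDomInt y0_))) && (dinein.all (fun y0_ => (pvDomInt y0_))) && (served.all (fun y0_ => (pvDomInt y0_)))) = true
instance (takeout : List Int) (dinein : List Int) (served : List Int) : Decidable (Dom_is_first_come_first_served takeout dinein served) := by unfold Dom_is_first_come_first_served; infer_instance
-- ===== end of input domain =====

-- B replaces A's index-pointer scan + leftover-index epilogue by a length pre-check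
-- and consumption of reversed copies of the two queues as stacks (alternative decomposition).


-- ===== PORT A =====
-- A's for-loop over `served` with two index pointers and early return,
-- then the final leftover-index check.
def fcfsLoop (takeout dinein : List Int) : Nat → Nat → List Int → Bool
  | ti, di, [] => decide (ti = takeout.length) && decide (di = dinein.length)
  | ti, di, order :: rest =>
    if ti < takeout.length ∧ takeout.getD ti 0 = order then
      fcfsLoop takeout dinein (ti + 1) di rest
    else if di < dinein.length ∧ dinein.getD di 0 = order then
      fcfsLoop takeout dinein ti (di + 1) rest
    else false

def is_first_come_first_served (takeout : List Int) (dinein : List Int) (served : List Int) : Bool :=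
  fcfsLoop takeout dinein 0 0 served

-- ===== PORT B =====
-- B's scan: pop from the ends of the reversed copies (rt[-1] / rd[-1] / pop()).
def fcfsAltLoop : List Int → List Int → List Int → Bool
  | _, _, [] => true
  | rt, rd, order :: rest =>
    if rt.getLast? = some order then fcfsAltLoop rt.dropLast rd rest
    else if rd.getLast? = some order then fcfsAltLoop rt rd.dropLast rest
    else false

def is_first_come_first_served_alt (takeout : List Int) (dinein : List Int) (served : List Int) : Bool :=
  if takeout.length + dinein.length ≠ served.length then false
  else fcfsAltLoop takeout.reverse dinein.reverse served

-- ===== PRECONDITION & SPEC =====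
def Spec_is_first_come_first_served (takeout : List Int) (dinein : List Int) (served : List Int) (out : Bool) : Prop := out = is_first_come_first_served_alt takeout dinein served
instance (takeout : List Int) (dinein : List Int) (served : List Int) (out : Bool) : Decidable (Spec_is_first_come_first_served takeout dinein served out) := by unfold Spec_is_first_come_first_served; infer_instance

-- ===== CLAIM (what is proved, stated in full; the proofs are below) =====
def Claim_equal_is_first_come_first_served : Prop := ∀ (takeout : List Int) (dinein : List Int) (served : List Int), Dom_is_first_come_first_served takeout dinein served → Spec_is_first_come_first_served takeout dinein served (is_first_come_first_served takeout dinein served)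

-- ===== LEMMAS AND PROOFS =====

-- A's loop at index state (ti, di) equals B's length test and stack scan on the
-- remaining suffixes.
lemma fcfsLoop_eq (served : List Int) : ∀ (takeout dinein : List Int) (ti di : Nat),
    ti ≤ takeout.length → di ≤ dinein.length →
    fcfsLoop takeout dinein ti di served =
      (decide ((takeout.length - ti) + (dinein.length - di) = served.length) &&
        fcfsAltLoop (takeout.drop ti).reverse (dinein.drop di).reverse served) := by
  induction served with
  | nil =>
    intro t d ti di hti hdi
    simp only [fcfsLoop, fcfsAltLoop, List.length_nil, Bool.and_true]
    rw [← Bool.decide_and, decide_eq_decide]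
    omega
  | cons o rest ih =>
    intro t d ti di hti hdi
    have hgl : ∀ (l : List Int) (i : Nat), ((l.drop i).reverse).getLast? = l[i]? := by
      intro l i; rw [List.getLast?_reverse, List.head?_drop]
    have hdl : ∀ (l : List Int) (i : Nat),
        ((l.drop i).reverse).dropLast = (l.drop (i + 1)).reverse := by
      intro l i
      rw [show ∀ (m : List Int), m.reverse.dropLast = m.tail.reverse by
            intro m; cases m <;> simp, List.tail_drop]
    simp only [fcfsLoop, fcfsAltLoop, hgl, hdl, List.length_cons]
    by_cases h1 : ti < t.length ∧ t.getD ti 0 = o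
    · have hget : t[ti]? = some o := by
        rw [List.getElem?_eq_getElem h1.1]
        simpa [List.getD, List.getElem?_eq_getElem h1.1] using h1.2
      rw [if_pos h1, if_pos hget, ih t d (ti + 1) di (by omega) hdi]
      have : t.length - ti + (d.length - di) = rest.length + 1 ↔
          t.length - (ti + 1) + (d.length - di) = rest.length := by omega
      simp only [decide_eq_decide.mpr this]
    · have hget : ¬ t[ti]? = some o := by
        intro hc
        have hlt : ti < t.length := by
          by_contra hge
          rw [List.getElem?_eq_none (by omega)] at hc; simp at hc
        apply h1
        refine ⟨hlt, ?_⟩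
        rw [List.getElem?_eq_getElem hlt] at hc
        simpa [List.getD, List.getElem?_eq_getElem hlt] using Option.some.inj hc
      rw [if_neg h1, if_neg hget]
      by_cases h2 : di < d.length ∧ d.getD di 0 = o
      · have hget2 : d[di]? = some o := by
          rw [List.getElem?_eq_getElem h2.1]
          simpa [List.getD, List.getElem?_eq_getElem h2.1] using h2.2
        rw [if_pos h2, if_pos hget2, ih t d ti (di + 1) hti (by omega)]
        have : t.length - ti + (d.length - di) = rest.length + 1 ↔
            t.length - ti + (d.length - (di + 1)) = rest.length := by omega
        simp only [decide_eq_decide.mpr this]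
      · have hget2 : ¬ d[di]? = some o := by
          intro hc
          have hlt : di < d.length := by
            by_contra hge
            rw [List.getElem?_eq_none (by omega)] at hc; simp at hc
          apply h2
          refine ⟨hlt, ?_⟩
          rw [List.getElem?_eq_getElem hlt] at hc
          simpa [List.getD, List.getElem?_eq_getElem hlt] using Option.some.inj hc
        rw [if_neg h2, if_neg hget2]
        simp

-- ===== VERDICT (by name: the statement is the Claim_ definition above) =====
theorem is_first_come_first_served_spec : Claim_equal_is_first_come_first_served := by
  intro t d s _
  unfold Spec_is_first_come_first_served is_first_come_first_served is_first_come_first_served_alt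
  rw [fcfsLoop_eq s t d 0 0 (Nat.zero_le _) (Nat.zero_le _)]
  simp only [Nat.sub_zero, List.drop_zero]
  by_cases h : t.length + d.length = s.length
  · simp [h]
  · simp [h]
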